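-- pv_equiv track=rewrite | github.com/NhutTien0905/itr-training-ecg-qrs_detection | flask/dataloader_v2.py | average_large_gaps
-- ===== SOURCE A (Python) =====
-- def average_large_gaps(middle_indices, threshold=50):
--     # Initialize result list
--     result_indices = []
--
--     i = 0
--     while i < len(middle_indices):
--         # Start of a new group
--         group_start = middle_indices[i]
--         group_indices = [group_start]
--         i += 1
--
--         # Collect all indices in this group
--         while i < len(middle_indices) and (middle_indices[i] - group_indices[-1] <= threshold):
--             group_indices.append(middle_indices[i])
--             i += 1
--
--         # Calculate the average index of the group
--         if group_indices:
--             average_index = sum(group_indices) // len(group_indices)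
--             result_indices.append(average_index)
--
--     return result_indices
-- ===== SOURCE B (Python) =====
-- def average_large_gaps(middle_indices, threshold=50):
--     # Two-phase: find the split positions (adjacent gap > threshold), then
--     # cut the list into segments there and take each segment's floor-average.
--     n = len(middle_indices)
--     if n == 0:
--         return []
--     cuts = [0] + [i for i in range(1, n)
--                   if middle_indices[i] - middle_indices[i - 1] > threshold] + [n]
--     segs = [middle_indices[a:b] for a, b in zip(cuts, cuts[1:])]
--     return [sum(seg) // len(seg) for seg in segs]
-- ===== Notes on version B (the rewrite author's own statement) =====
-- stated objective: alternative
-- what changed: Replaces A's nested index-driven while loops with a two-phase pass: collect the split positions where the adjacent gap exceeds the threshold, slice the list into segments at those positions, and map each segment to its floor-average.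
import Mathlib
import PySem

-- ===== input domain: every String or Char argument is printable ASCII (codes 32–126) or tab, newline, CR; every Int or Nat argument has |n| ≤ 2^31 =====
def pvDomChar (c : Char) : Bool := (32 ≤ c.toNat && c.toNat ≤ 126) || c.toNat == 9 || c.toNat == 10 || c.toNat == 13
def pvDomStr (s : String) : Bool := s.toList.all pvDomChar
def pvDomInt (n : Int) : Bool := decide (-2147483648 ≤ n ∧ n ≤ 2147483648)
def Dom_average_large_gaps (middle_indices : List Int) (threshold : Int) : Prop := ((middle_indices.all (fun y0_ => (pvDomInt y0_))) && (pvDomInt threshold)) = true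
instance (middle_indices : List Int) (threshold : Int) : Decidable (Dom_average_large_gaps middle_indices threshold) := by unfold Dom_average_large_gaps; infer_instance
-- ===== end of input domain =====

-- B replaces A's nested index-driven while loops with a two-phase pass: it first
-- collects the split positions where the adjacent gap exceeds the threshold, then
-- slices the list into segments there and maps each segment to its floor-average
-- (objective: alternative decomposition; a timing run measured it moderately faster).


-- ===== PORT A =====
-- inner while loop: consumes elements while the gap to group_indices[-1] is ≤ threshold;
-- returns (grown group, remaining suffix).  group is never empty (it starts as [group_start]),
-- so 'getLastD 0' coincides with Python's group_indices[-1].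
def agInner (xs : List Int) (threshold : Int) (group : List Int) : List Int × List Int :=
  match xs with
  | [] => (group, [])
  | x :: rest =>
    if x - group.getLastD 0 ≤ threshold then agInner rest threshold (group ++ [x])
    else (group, x :: rest)

theorem agInner_len (xs : List Int) (threshold : Int) (group : List Int) :
    (agInner xs threshold group).2.length ≤ xs.length := by
  induction xs generalizing group with
  | nil => simp [agInner]
  | cons x rest ih =>
    simp only [agInner]
    split
    · exact le_trans (ih _) (by simp)
    · simp

-- outer while loop: each iteration starts a group with the current element and runs the inner loop.
def average_large_gaps (middle_indices : List Int) (threshold : Int) : List Int :=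
  match middle_indices with
  | [] => []
  | x :: rest =>
    let p := agInner rest threshold [x]
    (if p.1 = [] then [] else [PySem.Int.floordiv p.1.sum (p.1.length : Int)]) ++
      average_large_gaps p.2 threshold
termination_by middle_indices.length
decreasing_by
  simpa using Nat.lt_succ_of_le (agInner_len rest threshold [x])

-- ===== PORT B =====
-- Source B, step for step.  The comprehension's indices i, i-1 always lie in range, so
-- 'pyGetD … 0' is exact for Python's middle_indices[i] / middle_indices[i-1] here.
def average_large_gaps_alt (middle_indices : List Int) (threshold : Int) : List Int :=
  if middle_indices.length = 0 then []
  else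
    let n : Int := middle_indices.length
    let cuts : List Int :=
      0 :: (PySem.List.pyRange 1 n 1).filter (fun i =>
        decide (threshold < PySem.List.pyGetD middle_indices i 0
                            - PySem.List.pyGetD middle_indices (i - 1) 0)) ++ [n]
    let segs := (cuts.zip cuts.tail).map
      (fun p => PySem.List.slice middle_indices (some p.1) (some p.2))
    segs.map (fun seg => PySem.Int.floordiv seg.sum (seg.length : Int))

-- ===== PRECONDITION & SPEC =====
def Spec_average_large_gaps (middle_indices : List Int) (threshold : Int) (out : List Int) : Prop := out = average_large_gaps_alt middle_indices threshold
instance (middle_indices : List Int) (threshold : Int) (out : List Int) : Decidable (Spec_average_large_gaps middle_indices threshold out) := by unfold Spec_average_large_gaps; infer_instance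

-- ===== CLAIM (what is proved, stated in full; the proofs are below) =====
def Claim_equal_average_large_gaps : Prop := ∀ (middle_indices : List Int) (threshold : Int), Dom_average_large_gaps middle_indices threshold → Spec_average_large_gaps middle_indices threshold (average_large_gaps middle_indices threshold)

-- ===== LEMMAS AND PROOFS =====

-- the reference grouping both ports are reduced to: groups in order, each group in order
def agGroups (middle_indices : List Int) (threshold : Int) : List (List Int) :=
  middle_indices.foldr (fun x gs =>
    match gs with
    | (y :: g) :: rest => if y - x ≤ threshold then (x :: y :: g) :: rest else [x] :: (y :: g) :: rest
    | _ => [[x]]) []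

-- "take one group" starting after element prev
def agTake (prev : Int) (xs : List Int) (threshold : Int) : List Int × List Int :=
  match xs with
  | [] => ([], [])
  | x :: rest =>
    if x - prev ≤ threshold then
      let p := agTake x rest threshold
      (x :: p.1, p.2)
    else ([], x :: rest)

theorem agTake_len (prev : Int) (xs : List Int) (threshold : Int) :
    (agTake prev xs threshold).2.length ≤ xs.length := by
  induction xs generalizing prev with
  | nil => simp [agTake]
  | cons x rest ih =>
    simp only [agTake]
    split
    · exact le_trans (ih x) (by simp)
    · simp

theorem agInner_eq_take (xs : List Int) (threshold : Int) (g : List Int) (p : Int) :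
    agInner xs threshold (g ++ [p]) =
      ((g ++ [p]) ++ (agTake p xs threshold).1, (agTake p xs threshold).2) := by
  induction xs generalizing g p with
  | nil => simp [agInner, agTake]
  | cons x rest ih =>
    simp only [agInner, agTake, List.getLastD_concat]
    split
    · have h := ih (g ++ [p]) x
      simpa using h
    · simp

theorem agGroups_cons (x : Int) (xs : List Int) (threshold : Int) :
    agGroups (x :: xs) threshold =
      (x :: (agTake x xs threshold).1) :: agGroups (agTake x xs threshold).2 threshold := by
  induction xs generalizing x with
  | nil => simp [agGroups, agTake]
  | cons y rest ih =>
    have hy := ih y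
    simp only [agGroups, List.foldr_cons] at hy ⊢
    rw [hy]
    by_cases h : y - x ≤ threshold
    · simp only [agTake, if_pos h]
    · simp only [agTake, if_neg h]
      simp only [List.foldr_cons]
      rw [hy]

-- A computes the averages of agGroups
theorem average_eq_groups (xs : List Int) (threshold : Int) :
    average_large_gaps xs threshold =
      (agGroups xs threshold).map (fun g => PySem.Int.floordiv g.sum (g.length : Int)) := by
  induction hn : xs.length using Nat.strong_induction_on generalizing xs with
  | _ n ih =>
    match xs with
    | [] => simp [average_large_gaps, agGroups]
    | x :: rest =>
      have hinner := agInner_eq_take rest threshold [] x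
      simp only [List.nil_append] at hinner
      rw [average_large_gaps, hinner]
      have hlen : (agTake x rest threshold).2.length < n := by
        have := agTake_len x rest threshold
        simp only [List.length_cons] at hn
        omega
      rw [ih _ hlen _ rfl, agGroups_cons]
      simp

-- B's break positions, at the Nat level
def brkN (xs : List Int) (threshold : Int) : List Nat :=
  (List.range (xs.length - 1)).filter
    (fun k => decide (threshold < xs.getD (k + 1) 0 - xs.getD k 0))

-- B's cut positions and segments, at the Nat level
def cutsN (xs : List Int) (threshold : Int) : List Nat :=
  0 :: (brkN xs threshold).map (· + 1) ++ [xs.length]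

def segsN (xs : List Int) (threshold : Int) : List (List Int) :=
  ((cutsN xs threshold).zip (cutsN xs threshold).tail).map
    (fun p => (xs.drop p.1).take (p.2 - p.1))

-- break positions of the port are brkN, cast and shifted by one
theorem brk_int_eq (xs : List Int) (threshold : Int) :
    (PySem.List.pyRange 1 (xs.length : Int) 1).filter (fun i =>
        decide (threshold < PySem.List.pyGetD xs i 0 - PySem.List.pyGetD xs (i - 1) 0)) =
      ((brkN xs threshold).map (· + 1)).map (fun k : Nat => (k : Int)) := by
  rw [PySem.List.pyRange_one, List.filter_map]
  unfold brkN
  rw [List.map_map]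
  have hm : ((xs.length : Int) - 1).toNat = xs.length - 1 := by omega
  rw [hm]
  have hf : (fun k : Nat => 1 + (k : Int)) = (fun k : Nat => ((k + 1 : Nat) : Int)) := by
    funext k; push_cast; ring
  rw [hf]
  have hfil : List.filter ((fun i =>
        decide (threshold < PySem.List.pyGetD xs i 0 - PySem.List.pyGetD xs (i - 1) 0)) ∘
        (fun k : Nat => ((k + 1 : Nat) : Int))) (List.range (xs.length - 1)) =
      List.filter (fun k => decide (threshold < xs.getD (k + 1) 0 - xs.getD k 0))
        (List.range (xs.length - 1)) := by
    apply List.filter_congr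
    intro k _
    simp only [Function.comp]
    have h2 : ((k + 1 : Nat) : Int) - 1 = ((k : Nat) : Int) := by push_cast; ring
    rw [PySem.List.pyGetD_natCast, h2, PySem.List.pyGetD_natCast]
  rw [hfil]
  simp [Function.comp]

-- the Int-level cuts of the port are cutsN cast
theorem cuts_int_eq (xs : List Int) (threshold : Int) :
    (0 :: (PySem.List.pyRange 1 (xs.length : Int) 1).filter (fun i =>
        decide (threshold < PySem.List.pyGetD xs i 0 - PySem.List.pyGetD xs (i - 1) 0))
      ++ [(xs.length : Int)]) = (cutsN xs threshold).map (fun k : Nat => (k : Int)) := by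
  rw [brk_int_eq]
  simp [cutsN]

-- shifting all cuts by one drops the head element
theorem segs_shift (x : Int) (ys : List Int) (c : List Nat) :
    ((c.map (· + 1)).zip ((c.map (· + 1)).tail)).map
        (fun p : Nat × Nat => ((x :: ys).drop p.1).take (p.2 - p.1)) =
      (c.zip c.tail).map (fun p : Nat × Nat => (ys.drop p.1).take (p.2 - p.1)) := by
  rw [← List.map_tail, List.zip_map, List.map_map]
  apply List.map_congr_left
  intro p _
  simp [Prod.map, List.drop_succ_cons, Nat.succ_sub_succ]

-- one step of brkN
theorem brkN_cons (x y : Int) (rest : List Int) (threshold : Int) :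
    brkN (x :: y :: rest) threshold =
      (if threshold < y - x then [0] else []) ++ (brkN (y :: rest) threshold).map (· + 1) := by
  unfold brkN
  simp only [List.length_cons, Nat.add_sub_cancel, List.range_succ_eq_map]
  rw [List.filter_cons, List.filter_map]
  have hfil : List.filter ((fun k =>
        decide (threshold < (x :: y :: rest).getD (k + 1) 0 - (x :: y :: rest).getD k 0)) ∘
        Nat.succ) (List.range rest.length) =
      List.filter (fun k => decide (threshold < (y :: rest).getD (k + 1) 0 - (y :: rest).getD k 0))
        (List.range rest.length) := by
    apply List.filter_congr
    intro k _
    simp [Function.comp, Nat.succ_eq_add_one]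
  rw [hfil, show (Nat.succ : Nat → Nat) = (· + 1) from rfl]
  by_cases hg : threshold < y - x
  · simp [hg]
  · simp [hg]

-- one step of cutsN, large-gap case
theorem cutsN_cons_big (x y : Int) (rest : List Int) (threshold : Int)
    (hg : threshold < y - x) :
    cutsN (x :: y :: rest) threshold = 0 :: (cutsN (y :: rest) threshold).map (· + 1) := by
  simp [cutsN, brkN_cons, if_pos hg, List.map_map]

-- one step of cutsN, small-gap case
theorem cutsN_cons_small (x y : Int) (rest : List Int) (threshold : Int)
    (hg : ¬ threshold < y - x) :
    cutsN (x :: y :: rest) threshold =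
      0 :: ((cutsN (y :: rest) threshold).tail).map (· + 1) := by
  simp [cutsN, brkN_cons, if_neg hg, List.map_map]

-- the tail of cutsN is never empty
theorem cutsN_tail_ne (xs : List Int) (threshold : Int) :
    (cutsN xs threshold).tail ≠ [] := by
  simp [cutsN]

-- B's segments are exactly the gap groups
theorem segsN_eq_groups (xs : List Int) (threshold : Int) (h : xs ≠ []) :
    segsN xs threshold = agGroups xs threshold := by
  induction xs with
  | nil => cases h rfl
  | cons x ys ih =>
    cases ys with
    | nil => simp [segsN, cutsN, brkN, agGroups]
    | cons y rest =>
      have ihy := ih (by simp)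
      have hstep : agGroups (x :: y :: rest) threshold =
          match agGroups (y :: rest) threshold with
          | (z :: g) :: gr =>
            if z - x ≤ threshold then (x :: z :: g) :: gr else [x] :: (z :: g) :: gr
          | _ => [[x]] := by
        simp [agGroups]
      obtain ⟨g, gr, hy⟩ : ∃ g gr, agGroups (y :: rest) threshold = (y :: g) :: gr :=
        ⟨_, _, agGroups_cons y rest threshold⟩
      obtain ⟨d, ds, hcuts⟩ : ∃ d ds, cutsN (y :: rest) threshold = 0 :: d :: ds := by
        rcases he : (cutsN (y :: rest) threshold).tail with _ | ⟨d, ds⟩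
        · exact absurd he (cutsN_tail_ne _ _)
        · exact ⟨d, ds, by rw [← he]; simp [cutsN]⟩
      by_cases hg : threshold < y - x
      · -- large gap: a new group [x] is opened
        unfold segsN
        rw [cutsN_cons_big x y rest threshold hg]
        have hz : ((0 :: (cutsN (y :: rest) threshold).map (· + 1)).zip
              ((0 :: (cutsN (y :: rest) threshold).map (· + 1)).tail)) =
            (0, 1) :: (((cutsN (y :: rest) threshold).map (· + 1)).zip
              (((cutsN (y :: rest) threshold).map (· + 1)).tail)) := by
          rw [hcuts]; simp
        rw [hz, List.map_cons, segs_shift]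
        rw [show ((cutsN (y :: rest) threshold).zip (cutsN (y :: rest) threshold).tail).map
              (fun p : Nat × Nat => ((y :: rest).drop p.1).take (p.2 - p.1)) =
            segsN (y :: rest) threshold from rfl]
        rw [ihy, hstep, hy]
        simp [show ¬ y - x ≤ threshold by omega]
      · -- small gap: x joins the first group
        unfold segsN
        rw [cutsN_cons_small x y rest threshold hg, hcuts]
        have hsy : segsN (y :: rest) threshold =
            ((y :: rest).take d) :: ((d :: ds).zip ds).map
              (fun p : Nat × Nat => ((y :: rest).drop p.1).take (p.2 - p.1)) := by
          unfold segsN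
          rw [hcuts]
          simp
        rw [hy] at ihy
        rw [hsy] at ihy
        obtain ⟨h1, h2⟩ := List.cons_eq_cons.mp ihy.symm
        have hz : ((0 : Nat) :: (d :: ds).map (· + 1)).zip ((d :: ds).map (· + 1)) =
            (0, d + 1) :: (((d :: ds).map (· + 1)).zip (((d :: ds).map (· + 1)).tail)) := by
          simp
        simp only [List.tail_cons]
        rw [hz, List.map_cons, segs_shift, hstep, hy]
        simp [show y - x ≤ threshold by omega, ← h1, ← h2]

-- B computes the averages of segsN on nonempty input
theorem alt_eq_segsN (xs : List Int) (threshold : Int) (h : xs ≠ []) :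
    average_large_gaps_alt xs threshold =
      (segsN xs threshold).map (fun g => PySem.Int.floordiv g.sum (g.length : Int)) := by
  unfold average_large_gaps_alt
  rw [if_neg (by simpa using h)]
  simp only [cuts_int_eq]
  unfold segsN
  rw [← List.map_tail, List.zip_map]
  simp only [List.map_map]
  apply List.map_congr_left
  intro p _
  simp [Prod.map, PySem.List.slice_natCast]

-- ===== VERDICT (by name: the statement is the Claim_ definition above) =====
theorem average_large_gaps_spec : Claim_equal_average_large_gaps := by
  intro xs t _
  unfold Spec_average_large_gaps
  by_cases h : xs = []
  · subst h; simp [average_large_gaps, average_large_gaps_alt]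
  · rw [alt_eq_segsN xs t h, segsN_eq_groups xs t h, average_eq_groups]
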